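-- pv_equiv track=rewrite | github.com/wanling131/SmartVocab | core/forgetting_curve/forgetting_curve_manager.py | _circular_slice
-- ===== SOURCE A (Python) =====
-- from typing import Any, List
--
-- def _circular_slice(items: List[Any], offset: int, limit: int) -> List[Any]:
--     """
--     在环形列表上从 offset 起取恰好 limit 条（不足时在列表头继续取）。
--     若 limit > len(items)，会按环重复同一批记录，以保证条数严格等于 limit。
--     """
--     n = len(items)
--     if n == 0 or limit <= 0:
--         return []
--     start_idx = offset % n
--     end_idx = start_idx + limit
--     if end_idx <= n:
--         return items[start_idx:end_idx]
--     # 跨边界：用下标取满 limit 条，避免「前半段 + [:end-n]」在 end-n > n 时条数错误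
--     return [items[(start_idx + i) % n] for i in range(limit)]
-- ===== SOURCE B (Python) =====
-- from typing import Any, List
--
-- def _circular_slice(items: List[Any], offset: int, limit: int) -> List[Any]:
--     n = len(items)
--     if n == 0 or limit <= 0:
--         return []
--     start = offset % n
--     rot = items[start:] + items[:start]
--     q, r = divmod(limit, n)
--     return rot * q + rot[:r]
-- ===== Notes on version B (the rewrite author's own statement) =====
-- stated objective: simpler
-- what changed: Replaces the two-branch logic (contiguous slice vs per-index modulo loop) with one uniform construction: rotate once, then assemble divmod(limit,n) whole copies plus a remainder slice.
import Mathlib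
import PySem

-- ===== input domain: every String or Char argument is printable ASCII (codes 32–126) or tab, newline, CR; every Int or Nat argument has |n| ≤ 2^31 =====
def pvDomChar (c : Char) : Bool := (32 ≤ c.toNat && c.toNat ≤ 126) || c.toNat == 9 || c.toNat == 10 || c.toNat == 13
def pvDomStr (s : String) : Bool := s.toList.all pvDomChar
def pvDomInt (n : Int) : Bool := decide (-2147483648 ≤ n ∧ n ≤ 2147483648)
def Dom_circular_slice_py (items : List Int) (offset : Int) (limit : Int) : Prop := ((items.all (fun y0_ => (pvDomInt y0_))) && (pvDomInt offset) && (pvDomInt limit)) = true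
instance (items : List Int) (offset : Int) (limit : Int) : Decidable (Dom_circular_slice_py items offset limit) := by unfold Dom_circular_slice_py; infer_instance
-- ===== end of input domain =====

-- B replaces A's two-branch logic (contiguous slice vs per-index modulo loop) by one uniform
-- construction: rotate once, then divmod(limit, n) whole copies plus a remainder slice (simpler).

-- ===== PORT A =====
def circular_slice_py (items : List Int) (offset : Int) (limit : Int) : List Int :=
  let n : Int := items.length
  if n = 0 ∨ limit ≤ 0 then []
  else
    let start_idx := PySem.Int.mod offset n
    let end_idx := start_idx + limit
    if end_idx ≤ n then PySem.List.slice items (some start_idx) (some end_idx)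
    else
      -- items[(start_idx + i) % n]: the index is always in [0, n), so no IndexError; default 0 unreachable
      (PySem.List.pyRange 0 limit 1).map
        (fun i => PySem.List.pyGetD items (PySem.Int.mod (start_idx + i) n) 0)

-- ===== PORT B =====
def circular_slice_py_alt (items : List Int) (offset : Int) (limit : Int) : List Int :=
  let n : Int := items.length
  if n = 0 ∨ limit ≤ 0 then []
  else
    let start := PySem.Int.mod offset n
    let rot := PySem.List.slice items (some start) none ++ PySem.List.slice items none (some start)
    let q := PySem.Int.floordiv limit n
    let r := PySem.Int.mod limit n
    -- rot * q is list repetition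
    (List.replicate q.toNat rot).flatten ++ PySem.List.slice rot none (some r)

-- ===== PRECONDITION & SPEC =====
def Spec_circular_slice_py (items : List Int) (offset : Int) (limit : Int) (out : List Int) : Prop := out = circular_slice_py_alt items offset limit
instance (items : List Int) (offset : Int) (limit : Int) (out : List Int) : Decidable (Spec_circular_slice_py items offset limit out) := by unfold Spec_circular_slice_py; infer_instance

-- ===== CLAIM (what is proved, stated in full; the proofs are below) =====
def Claim_equal_circular_slice_py : Prop := ∀ (items : List Int) (offset : Int) (limit : Int), Dom_circular_slice_py items offset limit → Spec_circular_slice_py items offset limit (circular_slice_py items offset limit)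

-- ===== LEMMAS AND PROOFS =====

/-- element `i` of the circular traversal of `items` starting at `s` -/
def pvG (items : List Int) (s i : Nat) : Int := items.getD ((s + i) % items.length) 0

/-- the first `k` elements of the circular traversal -/
def pvF (items : List Int) (s k : Nat) : List Int := (List.range k).map (pvG items s)

lemma pvG_add_len (items : List Int) (s i : Nat) :
    pvG items s (items.length + i) = pvG items s i := by
  unfold pvG
  have h : s + (items.length + i) = items.length + (s + i) := by omega
  rw [h, Nat.add_mod_left]

lemma pvF_len_add (items : List Int) (s a : Nat) :
    pvF items s (items.length + a) = pvF items s items.length ++ pvF items s a := by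
  simp only [pvF, List.range_add, List.map_append, List.map_map]
  congr 1
  apply List.map_congr_left
  intro i _
  simpa [Nat.add_comm] using pvG_add_len items s i

lemma pvF_rep (items : List Int) (s q a : Nat) :
    pvF items s (q * items.length + a) =
      (List.replicate q (pvF items s items.length)).flatten ++ pvF items s a := by
  induction q with
  | zero => simp
  | succ q ih =>
      have : (q + 1) * items.length + a = items.length + (q * items.length + a) := by ring
      rw [this, pvF_len_add, ih, List.replicate_succ, List.flatten_cons, List.append_assoc]

lemma pvF_take (items : List Int) (s r : Nat) (hr : r ≤ items.length) :
    (pvF items s items.length).take r = pvF items s r := by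
  simp only [pvF, ← List.map_take]
  simp [List.take_range, hr]

lemma pvRot_eq (items : List Int) (s : Nat) (hs : s < items.length) :
    items.drop s ++ items.take s = pvF items s items.length := by
  apply List.ext_getElem
  · simp [pvF]; omega
  · intro i h1 h2
    have hn : i < items.length := by simpa [pvF] using h2
    simp only [pvF, List.getElem_map, List.getElem_range, pvG]
    by_cases hc : i < items.length - s
    · rw [List.getElem_append_left (by simpa using hc)]
      have hmod : (s + i) % items.length = s + i := Nat.mod_eq_of_lt (by omega)
      rw [List.getElem_drop]
      simp [hmod, List.getD_eq_getElem?_getD, List.getElem?_eq_getElem (by omega : s + i < items.length)]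
    · rw [List.getElem_append_right (by simpa using hc)]
      have hmod : (s + i) % items.length = i - (items.length - s) := by
        have : s + i - items.length < items.length := by omega
        have h2' : (s + i) % items.length = (s + i - items.length) % items.length := by
          conv_lhs => rw [show s + i = items.length + (s + i - items.length) by omega]
          exact Nat.add_mod_left _ _
        rw [h2', Nat.mod_eq_of_lt this]; omega
      have hidx : i - (items.length - s) < s := by omega
      rw [List.getElem_take]
      simp [hmod, List.length_drop, List.getD_eq_getElem?_getD,
        List.getElem?_eq_getElem (show i - (items.length - s) < items.length by omega)]
  
lemma pvSlice_eq (items : List Int) (s L : Nat) (h : s + L ≤ items.length) :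
    (items.drop s).take L = pvF items s L := by
  apply List.ext_getElem
  · simp [pvF]; omega
  · intro i h1 h2
    have hi : i < L := by simpa [pvF] using h2
    simp only [pvF, List.getElem_map, List.getElem_range, pvG, List.getElem_take,
      List.getElem_drop]
    have hmod : (s + i) % items.length = s + i := Nat.mod_eq_of_lt (by omega)
    simp [hmod, List.getD_eq_getElem?_getD,
      List.getElem?_eq_getElem (show s + i < items.length by omega)]

lemma pvA_eq (items : List Int) (offset limit : Int) :
    circular_slice_py items offset limit = circular_slice_py_alt items offset limit := by
  unfold circular_slice_py circular_slice_py_alt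
  by_cases hg : (items.length : Int) = 0 ∨ limit ≤ 0
  · have hg' : items = [] ∨ limit ≤ 0 := by
      rcases hg with h | h
      · exact Or.inl (List.length_eq_zero_iff.mp (by exact_mod_cast h))
      · exact Or.inr h
    simp [hg']
  · simp only [hg, if_false]
    rw [not_or] at hg
    have hn : 0 < items.length := by
      have := hg.1; omega
    have hL0 : 0 < limit := by have := hg.2; omega
    have h0 : (0:Int) < (items.length : Int) := by exact_mod_cast hn
    have hst0 : 0 ≤ PySem.Int.mod offset (items.length : Int) := PySem.Int.mod_nonneg _ h0
    have hstlt : PySem.Int.mod offset (items.length : Int) < (items.length : Int) :=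
      PySem.Int.mod_lt _ h0
    obtain ⟨s, hscast⟩ : ∃ s : Nat, PySem.Int.mod offset (items.length : Int) = (s : Int) :=
      ⟨_, (Int.toNat_of_nonneg hst0).symm⟩
    rw [hscast] at hstlt ⊢
    have hs : s < items.length := by exact_mod_cast hstlt
    obtain ⟨L, hLcast⟩ : ∃ L : Nat, limit = (L : Int) :=
      ⟨_, (Int.toNat_of_nonneg (le_of_lt hL0)).symm⟩
    rw [hLcast] at hL0 ⊢
    have hLpos : 0 < L := by exact_mod_cast hL0
    -- B side reduces to pvF items s L
    have hrot : PySem.List.slice items (some (s : Int)) none ++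
        PySem.List.slice items none (some (s : Int)) = pvF items s items.length := by
      rw [PySem.List.slice_from_natCast, PySem.List.slice_to_natCast]
      exact pvRot_eq items s hs
    have hB : (List.replicate (PySem.Int.floordiv (L : Int) (items.length : Int)).toNat
          (PySem.List.slice items (some (s : Int)) none ++
            PySem.List.slice items none (some (s : Int)))).flatten ++
        PySem.List.slice
          (PySem.List.slice items (some (s : Int)) none ++
            PySem.List.slice items none (some (s : Int)))
          none (some (PySem.Int.mod (L : Int) (items.length : Int))) = pvF items s L := by
      rw [hrot, PySem.Int.floordiv_natCast, PySem.Int.mod_natCast, Int.toNat_natCast,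
        PySem.List.slice_to_natCast,
        pvF_take items s (L % items.length) (le_of_lt (Nat.mod_lt _ hn)),
        ← pvF_rep items s (L / items.length) (L % items.length)]
      have hdm : L / items.length * items.length + L % items.length = L := by
        rw [Nat.mul_comm]; exact Nat.div_add_mod L items.length
      rw [hdm]
    rw [hB]
    -- A side
    by_cases hfit : (s : Int) + (L : Int) ≤ (items.length : Int)
    · simp only [hfit, if_true]
      rw [PySem.List.slice_natCast_add]
      exact pvSlice_eq items s L (by exact_mod_cast hfit)
    · simp only [hfit, if_false]
      rw [PySem.List.pyRange_one]
      simp only [Int.sub_zero, Int.toNat_natCast, List.map_map]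
      apply List.map_congr_left
      intro k _
      show PySem.List.pyGetD items (PySem.Int.mod ((s : Int) + ((0 : Int) + (k : Int))) (items.length : Int)) 0 = pvG items s k
      have hcast : (s : Int) + ((0 : Int) + (k : Int)) = ((s + k : Nat) : Int) := by push_cast; ring
      rw [hcast, PySem.Int.mod_natCast, PySem.List.pyGetD_natCast]
      rfl

-- ===== VERDICT (by name: the statement is the Claim_ definition above) =====
theorem circular_slice_py_spec : Claim_equal_circular_slice_py := by
  intro items offset limit _
  unfold Spec_circular_slice_py
  exact pvA_eq items offset limit
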